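-- pv_equiv track=rewrite | github.com/ben-eliav/LogicAlgsHW1 | main.py | class_taught_constraints
-- ===== SOURCE A (Python) =====
-- def convert_and_to_or(constraints: list[list[int, int]]):
--     if len(constraints) == 1:
--         return constraints
--     elif len(constraints) == 2:
--         new_constraints = []
--         for c1 in constraints[0]:
--             for c2 in constraints[1]:
--                 new_constraints.append([c1, c2])
--         return new_constraints
--     else:
--         previous_constraints = convert_and_to_or(constraints[:-1])
--         new_constraints = []
--         for constraint in previous_constraints:
--             for c in constraints[-1]:
--                 new_constraints.append(constraint + [c])
--         return new_constraints
--
-- def class_taught_constraints(T, S, x_t_idx, y_st_idx):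
--     all_constraints = []
--     for subject in range(S):
--         current_constraint = []
--         for t in range(T):
--             current_constraint.append([y_st_idx[(subject, t)], x_t_idx[t]])
--         all_constraints.extend(convert_and_to_or(current_constraint))
--     return all_constraints
-- ===== SOURCE B (Python) =====
-- def class_taught_constraints(T, S, x_t_idx, y_st_idx):
--     all_constraints = []
--     for subject in range(S):
--         pairs = [[y_st_idx[(subject, t)], x_t_idx[t]] for t in range(T)]
--         if len(pairs) == 1:
--             combos = pairs
--         else:
--             combos = [[a, b] for a in pairs[0] for b in pairs[1]]
--             for col in pairs[2:]:
--                 combos = [c + [v] for c in combos for v in col]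
--         all_constraints += combos
--     return all_constraints
-- ===== Notes on version B (the rewrite author's own statement) =====
-- stated objective: simpler
-- what changed: Replaces the recursive convert_and_to_or helper (which rebuilds the prefix product on every call via list slicing) by a single in-line iterative fold that extends the combination list column by column; the per-subject pair list is built by a comprehension instead of an append loop.
import Mathlib
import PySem

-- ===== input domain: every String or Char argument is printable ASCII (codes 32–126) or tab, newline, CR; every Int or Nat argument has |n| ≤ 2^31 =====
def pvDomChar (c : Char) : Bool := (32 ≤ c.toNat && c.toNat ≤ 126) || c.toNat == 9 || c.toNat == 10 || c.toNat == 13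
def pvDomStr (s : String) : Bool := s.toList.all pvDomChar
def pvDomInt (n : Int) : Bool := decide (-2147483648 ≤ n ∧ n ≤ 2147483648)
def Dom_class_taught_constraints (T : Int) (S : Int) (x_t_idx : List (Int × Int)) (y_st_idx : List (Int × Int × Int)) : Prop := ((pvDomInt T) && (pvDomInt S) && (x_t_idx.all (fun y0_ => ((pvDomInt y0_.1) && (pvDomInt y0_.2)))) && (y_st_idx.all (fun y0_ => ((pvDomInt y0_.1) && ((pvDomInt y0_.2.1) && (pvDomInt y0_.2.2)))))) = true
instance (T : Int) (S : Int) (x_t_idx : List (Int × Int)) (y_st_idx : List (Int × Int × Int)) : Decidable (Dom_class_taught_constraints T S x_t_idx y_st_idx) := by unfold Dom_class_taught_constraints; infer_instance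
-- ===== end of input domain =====

-- B replaces A's recursive convert_and_to_or helper by a single in-line iterative fold
-- extending the combination list column by column (objective: simpler).

-- dict lookups shared by both ports (first match = Python dict semantics on these assoc lists);
-- `.getD 0` is only reached on a missing key, where Python raises KeyError — excluded by Pre_.
def pvLookupT (d : List (Int × Int)) (t : Int) : Option Int :=
  match d with
  | [] => none
  | (a, v) :: rest => if a = t then some v else pvLookupT rest t

def pvLookupST (d : List (Int × Int × Int)) (s t : Int) : Option Int :=
  match d with
  | [] => none
  | (a, b, v) :: rest => if a = s ∧ b = t then some v else pvLookupST rest s t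

-- ===== PORT A =====
def convertAndToOr (cs : List (List Int)) : List (List Int) :=
  if cs.length = 1 then cs
  else if cs.length = 2 then
    (cs.headD []).foldl (fun acc c1 =>
      (cs.getD 1 []).foldl (fun acc2 c2 => acc2 ++ [[c1, c2]]) acc) []
  else if cs.isEmpty then []  -- totality guard: Python recurses forever on []; excluded by Pre_
  else
    (convertAndToOr cs.dropLast).foldl (fun acc constraint =>
      (cs.getLastD []).foldl (fun acc2 c => acc2 ++ [constraint ++ [c]]) acc) []
termination_by cs.length
decreasing_by
  cases cs with
  | nil => simp at *
  | cons a l => simp [List.length_dropLast]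

def class_taught_constraints (T : Int) (S : Int) (x_t_idx : List (Int × Int)) (y_st_idx : List (Int × Int × Int)) : List (List Int) :=
  (PySem.List.pyRange 0 S 1).foldl (fun all_constraints subject =>
    all_constraints ++ convertAndToOr (
      (PySem.List.pyRange 0 T 1).foldl (fun cur t =>
        cur ++ [[(pvLookupST y_st_idx subject t).getD 0, (pvLookupT x_t_idx t).getD 0]]) [])) []

-- ===== PORT B =====
def pvExpandPairs (pairs : List (List Int)) : List (List Int) :=
  match pairs with
  | [] => []  -- totality guard: Python B raises IndexError on []; excluded by Pre_
  | [p] => [p]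
  | p0 :: p1 :: rest =>
    rest.foldl (fun combos col => combos.flatMap (fun c => col.map (fun v => c ++ [v])))
      (p0.flatMap (fun a => p1.map (fun b => [a, b])))

def class_taught_constraints_alt (T : Int) (S : Int) (x_t_idx : List (Int × Int)) (y_st_idx : List (Int × Int × Int)) : List (List Int) :=
  (PySem.List.pyRange 0 S 1).foldl (fun all_constraints subject =>
    all_constraints ++ pvExpandPairs (
      (PySem.List.pyRange 0 T 1).map (fun t =>
        [(pvLookupST y_st_idx subject t).getD 0, (pvLookupT x_t_idx t).getD 0]))) []

-- ===== PRECONDITION & SPEC =====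
-- Pre_ excludes exactly the inputs where Python A raises: T < 1 with S > 0 (convert_and_to_or
-- recurses forever / RecursionError on the empty list), and missing dict keys (KeyError).
-- (the length guards are implied by the key-coverage conditions — T distinct keys need T
-- entries — they only let the decision procedure short-circuit instead of enumerating a huge range)
def Pre_class_taught_constraints (T : Int) (S : Int) (x_t_idx : List (Int × Int)) (y_st_idx : List (Int × Int × Int)) : Prop :=
  if S ≤ 0 then True
  else if T < 1 then False
  else if (x_t_idx.length : Int) < T then False
  else if (y_st_idx.length : Int) < S * T then False
  else (∀ t ∈ PySem.List.pyRange 0 T 1, ∃ p ∈ x_t_idx, p.1 = t) ∧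
       (∀ s ∈ PySem.List.pyRange 0 S 1, ∀ t ∈ PySem.List.pyRange 0 T 1, ∃ e ∈ y_st_idx, e.1 = s ∧ e.2.1 = t)
instance (T : Int) (S : Int) (x_t_idx : List (Int × Int)) (y_st_idx : List (Int × Int × Int)) : Decidable (Pre_class_taught_constraints T S x_t_idx y_st_idx) := by unfold Pre_class_taught_constraints; infer_instance

def pvWitness_class_taught_constraints : Int × Int × (List (Int × Int)) × (List (Int × Int × Int)) :=
  (2, 2, [(0, 10), (1, 11)], [(0, 0, 20), (0, 1, 21), (1, 0, 22), (1, 1, 23)])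

def Spec_class_taught_constraints (T : Int) (S : Int) (x_t_idx : List (Int × Int)) (y_st_idx : List (Int × Int × Int)) (out : List (List Int)) : Prop := out = class_taught_constraints_alt T S x_t_idx y_st_idx
instance (T : Int) (S : Int) (x_t_idx : List (Int × Int)) (y_st_idx : List (Int × Int × Int)) (out : List (List Int)) : Decidable (Spec_class_taught_constraints T S x_t_idx y_st_idx out) := by unfold Spec_class_taught_constraints; infer_instance

-- ===== CLAIM (what is proved, stated in full; the proofs are below) =====
def Claim_equal_class_taught_constraints : Prop := ∀ (T : Int) (S : Int) (x_t_idx : List (Int × Int)) (y_st_idx : List (Int × Int × Int)), Dom_class_taught_constraints T S x_t_idx y_st_idx → Pre_class_taught_constraints T S x_t_idx y_st_idx → Spec_class_taught_constraints T S x_t_idx y_st_idx (class_taught_constraints T S x_t_idx y_st_idx)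

-- ===== LEMMAS AND PROOFS =====

-- A's nested append loops are a flatMap (pair base case).
theorem nested_foldl_pairs (p0 p1 : List Int) (init : List (List Int)) :
    p0.foldl (fun acc c1 => p1.foldl (fun acc2 c2 => acc2 ++ [[c1, c2]]) acc) init
      = init ++ p0.flatMap (fun a => p1.map (fun b => [a, b])) := by
  induction p0 generalizing init with
  | nil => simp
  | cons a tl ih =>
    rw [List.foldl_cons, ih, PySem.List.foldl_append_singleton_eq_map]
    simp

-- A's nested append loops are a flatMap (extension step).
theorem nested_foldl_ext (prev : List (List Int)) (col : List Int) (init : List (List Int)) :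
    prev.foldl (fun acc c => col.foldl (fun acc2 v => acc2 ++ [c ++ [v]]) acc) init
      = init ++ prev.flatMap (fun c => col.map (fun v => c ++ [v])) := by
  induction prev generalizing init with
  | nil => simp
  | cons a tl ih =>
    rw [List.foldl_cons, ih, PySem.List.foldl_append_singleton_eq_map]
    simp

theorem conv_eq_expand_cons2 (rest : List (List Int)) : ∀ p0 p1 : List Int,
    convertAndToOr (p0 :: p1 :: rest) = pvExpandPairs (p0 :: p1 :: rest) := by
  induction rest using List.reverseRecOn with
  | nil =>
    intro p0 p1
    rw [convertAndToOr, if_neg (by simp), if_pos (by simp)]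
    simp only [List.headD_cons, List.getD_cons_succ, List.getD_cons_zero]
    rw [nested_foldl_pairs]
    simp only [pvExpandPairs, List.foldl_nil, List.nil_append]
  | append_singleton rs r ih =>
    intro p0 p1
    have hshape : p0 :: p1 :: (rs ++ [r]) = (p0 :: p1 :: rs) ++ [r] := by simp
    rw [convertAndToOr]
    rw [if_neg (by intro hc; simp at hc : ¬ (p0 :: p1 :: (rs ++ [r])).length = 1),
        if_neg (by intro hc; simp at hc : ¬ (p0 :: p1 :: (rs ++ [r])).length = 2),
        if_neg (by simp : ¬ (p0 :: p1 :: (rs ++ [r])).isEmpty = true)]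
    have hdrop : (p0 :: p1 :: (rs ++ [r])).dropLast = p0 :: p1 :: rs := by
      rw [hshape, List.dropLast_concat]
    have hlast : (p0 :: p1 :: (rs ++ [r])).getLastD [] = r := by
      rw [hshape, List.getLastD_concat]
    rw [hdrop, hlast, ih, nested_foldl_ext]
    simp [pvExpandPairs, List.foldl_append]

theorem conv_eq_expand (cs : List (List Int)) (h : cs ≠ []) :
    convertAndToOr cs = pvExpandPairs cs := by
  match cs with
  | [] => exact absurd rfl h
  | [p] =>
    rw [convertAndToOr, if_pos (by simp)]
    simp [pvExpandPairs]
  | p0 :: p1 :: rest => exact conv_eq_expand_cons2 rest p0 p1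

theorem class_taught_constraints_spec : Claim_equal_class_taught_constraints := by
  intro T S x y _hdom hpre
  unfold Spec_class_taught_constraints class_taught_constraints class_taught_constraints_alt
  apply PySem.List.foldl_congr_mem
  intro acc s hs
  have hS : 0 < S := by
    rcases (PySem.List.mem_pyRange_one.mp hs) with ⟨h0, h1⟩; omega
  have hT : 1 ≤ T := by
    unfold Pre_class_taught_constraints at hpre
    rw [if_neg (by omega)] at hpre
    by_contra hc
    rw [if_pos (by omega)] at hpre
    exact hpre
  have hne : ∀ f : Int → List Int, (PySem.List.pyRange 0 T 1).map f ≠ [] := by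
    intro f h
    have := congrArg List.length h
    simp [PySem.List.length_pyRange_one] at this
    omega
  congr 1
  rw [PySem.List.foldl_append_singleton_eq_map, List.nil_append, conv_eq_expand _ (hne _)]
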